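-- pv_equiv track=rewrite | github.com/weiyangzen/awesome_algorithms | Algorithms/物理-量子信息-0243-表面码_(Surface_Code)/demo.py | syndrome_from_errors
-- ===== SOURCE A (Python) =====
-- Edge = tuple[str, int, int]  # ('h'|'v', x, y)
--
-- Vertex = tuple[int, int]  # (x, y)
--
-- def measured_vertices(d: int) -> list[Vertex]:
--     """Interior vertices where X-stabilizers are measured.
--
--     We treat y=0 and y=d-1 as rough boundaries for the Z-error decoding sector,
--     so interior rows y=1..d-2 host measured syndromes.
--     """
--     return [(x, y) for y in range(1, d - 1) for x in range(d)]
--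
-- def incident_edges(v: Vertex, d: int) -> list[Edge]:
--     """Return data edges touching vertex v."""
--     x, y = v
--     out: list[Edge] = []
--
--     if x > 0:
--         out.append(("h", x - 1, y))
--     if x < d - 1:
--         out.append(("h", x, y))
--     if y > 0:
--         out.append(("v", x, y - 1))
--     if y < d - 1:
--         out.append(("v", x, y))
--
--     return out
--
-- def syndrome_from_errors(error_edges: set[Edge], d: int) -> list[Vertex]:
--     """Compute X-stabilizer syndrome for Z errors."""
--     defects: list[Vertex] = []
--     for v in measured_vertices(d):
--         parity = 0
--         for e in incident_edges(v, d):
--             if e in error_edges: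
--                 parity ^= 1
--         if parity == 1:
--             defects.append(v)
--     return defects
-- ===== SOURCE B (Python) =====
-- def syndrome_from_errors(error_edges, d):
--     """Compute X-stabilizer syndrome for Z errors.
--
--     One pass over the error edges: each lattice edge flips the parity of its
--     two endpoint vertices; defects are the measured vertices with odd parity,
--     listed in (row, column) order.
--     """
--     parity = {}
--
--     def flip(v):
--         parity[v] = parity.get(v, 0) ^ 1
--
--     for (kind, x, y) in set(error_edges):
--         if kind == "h":
--             if 0 <= x <= d - 2:
--                 flip((x, y))
--                 flip((x + 1, y))
--         elif kind == "v":
--             if 0 <= y <= d - 2: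
--                 flip((x, y))
--                 flip((x, y + 1))
--
--     defects = [v for (v, p) in parity.items()
--                if p == 1 and 0 <= v[0] <= d - 1 and 1 <= v[1] <= d - 2]
--     defects.sort(key=lambda v: (v[1], v[0]))
--     return defects
-- ===== Notes on version B (the rewrite author's own statement) =====
-- stated objective: faster
-- what changed: Instead of scanning all (d-2)*d measured vertices and probing each of its 4 incident edges against the error set, B makes one pass over the error edges, flipping the parity of each lattice edge's two endpoint vertices in a dict, then collects the odd measured vertices and sorts them by (y, x).
import Mathlib
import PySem

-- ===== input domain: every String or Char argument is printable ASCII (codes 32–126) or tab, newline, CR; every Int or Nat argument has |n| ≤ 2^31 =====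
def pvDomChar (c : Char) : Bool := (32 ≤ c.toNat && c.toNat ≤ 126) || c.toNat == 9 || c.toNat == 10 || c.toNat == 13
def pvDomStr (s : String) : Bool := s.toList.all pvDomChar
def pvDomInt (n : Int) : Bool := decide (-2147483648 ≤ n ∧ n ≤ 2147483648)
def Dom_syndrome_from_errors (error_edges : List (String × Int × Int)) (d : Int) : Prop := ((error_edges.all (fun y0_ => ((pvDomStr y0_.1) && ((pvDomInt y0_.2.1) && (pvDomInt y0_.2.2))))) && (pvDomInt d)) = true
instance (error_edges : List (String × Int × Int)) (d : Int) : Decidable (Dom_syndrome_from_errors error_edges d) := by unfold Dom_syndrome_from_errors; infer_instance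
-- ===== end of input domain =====

-- B replaces A's scan of all (d-2)*d measured vertices (probing each vertex's ≤4 incident
-- edges against the error set) by one pass over the error edges that flips the parity of each
-- lattice edge's two endpoints in a dict, then sorts the odd measured vertices by (y, x).

-- ===== PORT A =====
def measured_vertices (d : Int) : List (Int × Int) :=
  (PySem.List.pyRange 1 (d - 1) 1).flatMap (fun y =>
    (PySem.List.pyRange 0 d 1).map (fun x => (x, y)))

def incident_edges (v : Int × Int) (d : Int) : List (String × Int × Int) :=
  (if v.1 > 0 then [("h", v.1 - 1, v.2)] else []) ++
  (if v.1 < d - 1 then [("h", v.1, v.2)] else []) ++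
  (if v.2 > 0 then [("v", v.1, v.2 - 1)] else []) ++
  (if v.2 < d - 1 then [("v", v.1, v.2)] else [])

def syndrome_from_errors (error_edges : List (String × Int × Int)) (d : Int) : List (Int × Int) :=
  (measured_vertices d).foldl (fun defects v =>
    let parity : Int := (incident_edges v d).foldl (fun parity e =>
      if error_edges.contains e then PySem.Int.bxor parity 1 else parity) 0
    if parity = 1 then defects ++ [v] else defects) []

-- ===== PORT B =====
-- parity[v] = parity.get(v, 0) ^ 1
def pvFlip (parity : PySem.Dict (Int × Int) Int) (v : Int × Int) : PySem.Dict (Int × Int) Int :=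
  parity.insert v (PySem.Int.bxor (parity.getD v 0) 1)

def syndrome_from_errors_alt (error_edges : List (String × Int × Int)) (d : Int) : List (Int × Int) :=
  let parity := (PySem.Set.ofList error_edges).foldl (fun parity e =>
    if e.1 == "h" then
      (if 0 ≤ e.2.1 ∧ e.2.1 ≤ d - 2 then pvFlip (pvFlip parity (e.2.1, e.2.2)) (e.2.1 + 1, e.2.2) else parity)
    else if e.1 == "v" then
      (if 0 ≤ e.2.2 ∧ e.2.2 ≤ d - 2 then pvFlip (pvFlip parity (e.2.1, e.2.2)) (e.2.1, e.2.2 + 1) else parity)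
    else parity) PySem.Dict.empty
  let defects := (parity.items.filter (fun vp =>
    vp.2 == 1 && decide (0 ≤ vp.1.1 ∧ vp.1.1 ≤ d - 1 ∧ 1 ≤ vp.1.2 ∧ vp.1.2 ≤ d - 2))).map (·.1)
  PySem.List.sorted2 defects (fun v => v.2) (fun v => v.1)

-- ===== PRECONDITION & SPEC =====
def Spec_syndrome_from_errors (error_edges : List (String × Int × Int)) (d : Int) (out : List (Int × Int)) : Prop := out = syndrome_from_errors_alt error_edges d
instance (error_edges : List (String × Int × Int)) (d : Int) (out : List (Int × Int)) : Decidable (Spec_syndrome_from_errors error_edges d out) := by unfold Spec_syndrome_from_errors; infer_instance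

-- ===== CLAIM (what is proved, stated in full; the proofs are below) =====
def Claim_equal_syndrome_from_errors : Prop := ∀ (error_edges : List (String × Int × Int)) (d : Int), Dom_syndrome_from_errors error_edges d → Spec_syndrome_from_errors error_edges d (syndrome_from_errors error_edges d)

-- ===== LEMMAS AND PROOFS =====

-- lexicographic (y, x) order on vertices
def pvLexLt (a b : Int × Int) : Prop := a.2 < b.2 ∨ (a.2 = b.2 ∧ a.1 < b.1)
def pvLexLe (a b : Int × Int) : Prop := a.2 < b.2 ∨ (a.2 = b.2 ∧ a.1 ≤ b.1)
def pvBefore (a b : Int × Int) : Bool :=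
  decide (a.2 < b.2) || (!decide (b.2 < a.2) && decide (a.1 < b.1))

-- the vertices whose parity edge e flips in B
def pvToggles (d : Int) (e : String × Int × Int) : List (Int × Int) :=
  if e.1 = "h" then
    (if 0 ≤ e.2.1 ∧ e.2.1 ≤ d - 2 then [(e.2.1, e.2.2), (e.2.1 + 1, e.2.2)] else [])
  else if e.1 = "v" then
    (if 0 ≤ e.2.2 ∧ e.2.2 ≤ d - 2 then [(e.2.1, e.2.2), (e.2.1, e.2.2 + 1)] else [])
  else []

def pvMeasured (d : Int) (v : Int × Int) : Prop :=
  0 ≤ v.1 ∧ v.1 ≤ d - 1 ∧ 1 ≤ v.2 ∧ v.2 ≤ d - 2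

def pvStep (d : Int) (parity : PySem.Dict (Int × Int) Int) (e : String × Int × Int) :
    PySem.Dict (Int × Int) Int :=
  if e.1 == "h" then
    (if 0 ≤ e.2.1 ∧ e.2.1 ≤ d - 2 then pvFlip (pvFlip parity (e.2.1, e.2.2)) (e.2.1 + 1, e.2.2) else parity)
  else if e.1 == "v" then
    (if 0 ≤ e.2.2 ∧ e.2.2 ≤ d - 2 then pvFlip (pvFlip parity (e.2.1, e.2.2)) (e.2.1, e.2.2 + 1) else parity)
  else parity

def pvAparity (error_edges : List (String × Int × Int)) (d : Int) (v : Int × Int) : Int :=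
  (incident_edges v d).foldl (fun parity e =>
    if error_edges.contains e then PySem.Int.bxor parity 1 else parity) 0

-- insertBy with pvBefore keeps the list (y,x)-sorted
theorem pv_insertBy_pairwise (x : Int × Int) (ys : List (Int × Int))
    (h : ys.Pairwise pvLexLe) :
    (PySem.List.insertBy pvBefore x ys).Pairwise pvLexLe := by
  induction ys with
  | nil => simp [PySem.List.insertBy, pvLexLe]
  | cons y ys ih =>
    rw [List.pairwise_cons] at h
    obtain ⟨hy, hys⟩ := h
    by_cases hb : pvBefore x y = true
    · have hxy : pvLexLe x y := by
        simp [pvBefore] at hb; unfold pvLexLe; omega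
      have heq : PySem.List.insertBy pvBefore x (y :: ys) = x :: y :: ys := by
        simp [PySem.List.insertBy, hb]
      rw [heq]
      refine List.Pairwise.cons ?_ (List.Pairwise.cons hy hys)
      intro z hz
      rcases List.mem_cons.mp hz with rfl | hz
      · exact hxy
      · have := hy z hz
        unfold pvLexLe at *; omega
    · have hyx : pvLexLe y x := by
        simp [pvBefore] at hb; unfold pvLexLe; omega
      have heq : PySem.List.insertBy pvBefore x (y :: ys) = y :: PySem.List.insertBy pvBefore x ys := by
        simp [PySem.List.insertBy, hb]
      rw [heq]
      refine List.Pairwise.cons ?_ (ih hys)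
      intro z hz
      rw [PySem.List.insertBy_mem_iff] at hz
      rcases hz with rfl | hz
      · exact hyx
      · exact hy z hz

theorem pv_foldl_insertBy_pairwise (xs : List (Int × Int)) (acc : List (Int × Int))
    (h : acc.Pairwise pvLexLe) :
    (xs.foldl (fun a x => PySem.List.insertBy pvBefore x a) acc).Pairwise pvLexLe := by
  induction xs generalizing acc with
  | nil => exact h
  | cons x xs ih => exact ih _ (pv_insertBy_pairwise x acc h)

theorem pv_foldl_insertBy_perm (xs : List (Int × Int)) (acc : List (Int × Int)) :
    (xs.foldl (fun a x => PySem.List.insertBy pvBefore x a) acc).Perm (acc ++ xs) := by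
  induction xs generalizing acc with
  | nil => simp
  | cons x xs ih =>
    have h1 : ((x :: xs).foldl (fun a x => PySem.List.insertBy pvBefore x a) acc)
        = xs.foldl (fun a x => PySem.List.insertBy pvBefore x a) (PySem.List.insertBy pvBefore x acc) := rfl
    rw [h1]
    exact ((ih _).trans (((PySem.List.insertBy_perm pvBefore x acc).append_right xs).trans
      (List.perm_middle (a := x) (l₁ := acc) (l₂ := xs)).symm))

theorem pv_sorted2_eq (xs ys : List (Int × Int)) (hp : ys.Perm xs)
    (h : ys.Pairwise pvLexLt) :
    PySem.List.sorted2 xs (fun v => v.2) (fun v => v.1) = ys := by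
  have hfold : PySem.List.sorted2 xs (fun v => v.2) (fun v => v.1)
      = xs.foldl (fun a x => PySem.List.insertBy pvBefore x a) [] := rfl
  rw [hfold]
  have h1 : (xs.foldl (fun a x => PySem.List.insertBy pvBefore x a) []).Pairwise pvLexLe :=
    pv_foldl_insertBy_pairwise xs [] (by simp)
  have h2 : (xs.foldl (fun a x => PySem.List.insertBy pvBefore x a) []).Perm ys :=
    (pv_foldl_insertBy_perm xs []).trans (by simpa using hp.symm)
  have h3 : ys.Pairwise pvLexLe := h.imp (by intro a b hab; unfold pvLexLt pvLexLe at *; omega)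
  refine List.eq_of_perm_of_sorted ?_ h1 h3 h2
  intro a b _ _ hab hba
  unfold pvLexLe at hab hba
  have : a.1 = b.1 ∧ a.2 = b.2 := by omega
  exact Prod.ext this.1 this.2

-- xor-accumulating fold counts parity
theorem pv_xorfold {α : Type} (q : α → Bool) (L : List α) (p : Int) (hp : p = 0 ∨ p = 1) :
    L.foldl (fun acc e => if q e then PySem.Int.bxor acc 1 else acc) p
      = (p + (L.countP q : Int)) % 2 := by
  induction L generalizing p with
  | nil => rcases hp with rfl | rfl <;> simp
  | cons e L ih =>
    by_cases hq : q e = true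
    · have hb : PySem.Int.bxor p 1 = 1 - p := by rcases hp with rfl | rfl <;> decide
      rw [List.foldl_cons, if_pos hq, ih (PySem.Int.bxor p 1) (by rcases hp with rfl | rfl <;> simp [hb]),
        hb, List.countP_cons]
      simp only [hq, if_pos]
      push_cast
      omega
    · rw [List.foldl_cons, if_neg hq, ih p hp, List.countP_cons]
      simp [hq]

-- A's value is the filter of the measured vertices by odd parity
theorem pv_A_eq_filter (error_edges : List (String × Int × Int)) (d : Int) :
    syndrome_from_errors error_edges d
      = (measured_vertices d).filter (fun v => decide (pvAparity error_edges d v = 1)) := by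
  have h := PySem.List.foldl_append_ite (p := fun v => pvAparity error_edges d v = 1)
    (f := fun v : Int × Int => v) (l := measured_vertices d) (acc := [])
  unfold syndrome_from_errors pvAparity
  unfold pvAparity at h
  simpa using h

-- dict lookup commutes with one B step
theorem pv_getD_flip_flip (parity : PySem.Dict (Int × Int) Int) (a b v : Int × Int)
    (hab : a ≠ b) :
    (pvFlip (pvFlip parity a) b).getD v 0
      = if v ∈ [a, b] then PySem.Int.bxor (parity.getD v 0) 1 else parity.getD v 0 := by
  unfold pvFlip
  simp only [PySem.Dict.getD_insert, List.mem_cons, List.not_mem_nil, or_false]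
  split_ifs with hvb hva hmem hmem' <;> simp_all

theorem pv_getD_step (d : Int) (parity : PySem.Dict (Int × Int) Int)
    (e : String × Int × Int) (v : Int × Int) :
    (pvStep d parity e).getD v 0
      = if v ∈ pvToggles d e then PySem.Int.bxor (parity.getD v 0) 1 else parity.getD v 0 := by
  obtain ⟨t, x, y⟩ := e
  unfold pvStep pvToggles
  by_cases ht : t = "h"
  · simp only [ht, beq_iff_eq, reduceIte]
    split_ifs with hg hm hm
    · rw [pv_getD_flip_flip _ _ _ _ (by intro h; rw [Prod.mk.injEq] at h; omega), if_pos hm]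
    · rw [pv_getD_flip_flip _ _ _ _ (by intro h; rw [Prod.mk.injEq] at h; omega), if_neg hm]
    · simp_all
    · rfl
  · by_cases hv : t = "v"
    · simp only [hv, beq_iff_eq, reduceIte]
      simp only [if_neg (show ¬("v" : String) = "h" from by decide)]
      split_ifs with hg hm hm
      · rw [pv_getD_flip_flip _ _ _ _ (by intro h; rw [Prod.mk.injEq] at h; omega), if_pos hm]
      · rw [pv_getD_flip_flip _ _ _ _ (by intro h; rw [Prod.mk.injEq] at h; omega), if_neg hm]
      · simp_all
      · rfl
    · simp only [beq_iff_eq, ht, hv, List.not_mem_nil, if_false]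

theorem pv_getD_fold (d : Int) (L : List (String × Int × Int))
    (parity : PySem.Dict (Int × Int) Int) (v : Int × Int) :
    (L.foldl (pvStep d) parity).getD v 0
      = L.foldl (fun p e => if decide (v ∈ pvToggles d e) then PySem.Int.bxor p 1 else p)
          (parity.getD v 0) := by
  induction L generalizing parity with
  | nil => rfl
  | cons e L ih =>
    simp only [List.foldl_cons]
    rw [ih, pv_getD_step]
    by_cases hv : v ∈ pvToggles d e <;> simp [hv]

theorem pv_keys_nodup_fold (d : Int) (L : List (String × Int × Int))
    (parity : PySem.Dict (Int × Int) Int) (h : parity.keys.Nodup) :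
    ((L.foldl (pvStep d) parity).keys).Nodup := by
  induction L generalizing parity with
  | nil => exact h
  | cons e L ih =>
    refine ih _ ?_
    unfold pvStep pvFlip
    split_ifs <;> first
      | exact h
      | exact PySem.Dict.nodup_keys_insert _ _ _ (PySem.Dict.nodup_keys_insert _ _ _ h)

theorem pv_mem_measured (d : Int) (v : Int × Int) :
    v ∈ measured_vertices d ↔ pvMeasured d v := by
  unfold measured_vertices pvMeasured
  simp only [List.mem_flatMap, List.mem_map, PySem.List.mem_pyRange_one]
  constructor
  · rintro ⟨y, hy, x, hx, rfl⟩; simp; omega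
  · rintro ⟨h1, h2, h3, h4⟩
    exact ⟨v.2, by omega, v.1, by omega, rfl⟩

theorem pv_pairwise_measured (d : Int) : (measured_vertices d).Pairwise pvLexLt := by
  unfold measured_vertices
  rw [List.pairwise_flatMap]
  constructor
  · intro y _
    rw [List.pairwise_map]
    exact (PySem.List.pairwise_lt_pyRange_one 0 d).imp (by intro a b h; exact Or.inr ⟨rfl, h⟩)
  · refine (PySem.List.pairwise_lt_pyRange_one 1 (d-1)).imp ?_
    intro y y' h p hp q hq
    simp only [List.mem_map] at hp hq
    obtain ⟨xp, _, rfl⟩ := hp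
    obtain ⟨xq, _, rfl⟩ := hq
    exact Or.inl h

-- geometry: for a measured vertex, B toggles v at e exactly when A probes e at v
set_option maxHeartbeats 1000000 in
theorem pv_geometry (d : Int) (v : Int × Int) (e : String × Int × Int)
    (hm : pvMeasured d v) :
    v ∈ pvToggles d e ↔ e ∈ incident_edges v d := by
  obtain ⟨t, x, y⟩ := e
  obtain ⟨a, b⟩ := v
  obtain ⟨h1, h2, h3, h4⟩ := hm
  by_cases ht : t = "h"
  · subst ht
    unfold pvToggles incident_edges
    simp only [List.mem_append]
    split_ifs <;> simp_all [Prod.ext_iff] <;> omega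
  · by_cases hv : t = "v"
    · subst hv
      unfold pvToggles incident_edges
      simp only [List.mem_append]
      split_ifs <;> simp_all [Prod.ext_iff] <;> omega
    · rw [show pvToggles d (t, x, y) = [] by unfold pvToggles; simp [ht, hv]]
      simp only [List.not_mem_nil, false_iff]
      intro h
      unfold incident_edges at h
      simp only [List.mem_append] at h
      rcases h with ((h | h) | h) | h <;>
        · split_ifs at h <;> simp only [List.mem_singleton, Prod.mk.injEq, List.not_mem_nil] at h
          first | exact ht h.1 | exact hv h.1

theorem pv_nodup_incident (d : Int) (v : Int × Int) : (incident_edges v d).Nodup := by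
  unfold incident_edges
  split_ifs <;> simp_all [Prod.ext_iff]

theorem pv_nodup_measured (d : Int) : (measured_vertices d).Nodup := by
  have h := pv_pairwise_measured d
  exact h.imp (fun {a b} hab => by
    intro heq
    subst heq
    unfold pvLexLt at hab
    omega)

theorem pv_getD_final (error_edges : List (String × Int × Int)) (d : Int) (v : Int × Int) :
    (((PySem.Set.ofList error_edges).foldl (pvStep d) PySem.Dict.empty).getD v 0)
      = (0 + (((PySem.Set.ofList error_edges).countP (fun e => decide (v ∈ pvToggles d e)) : Int))) % 2 := by
  rw [pv_getD_fold, PySem.Dict.getD_empty]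
  exact pv_xorfold _ _ 0 (Or.inl rfl)

-- for a measured vertex the two programs compute the same parity
theorem pv_parity_eq (error_edges : List (String × Int × Int)) (d : Int) (v : Int × Int)
    (hm : pvMeasured d v) :
    pvAparity error_edges d v
      = (((PySem.Set.ofList error_edges).foldl (pvStep d) PySem.Dict.empty).getD v 0) := by
  rw [pv_getD_final]
  unfold pvAparity
  rw [pv_xorfold (fun e => error_edges.contains e) _ 0 (Or.inl rfl)]
  have h4 : (incident_edges v d).countP (fun e => error_edges.contains e)
      = (PySem.Set.ofList error_edges).countP (fun e => decide (v ∈ pvToggles d e)) := by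
    rw [List.countP_eq_length_filter, List.countP_eq_length_filter]
    apply List.Perm.length_eq
    rw [List.perm_ext_iff_of_nodup ((pv_nodup_incident d v).filter _)
      ((PySem.Set.nodup_ofList error_edges).filter _)]
    intro e
    have hg := pv_geometry d v e hm
    have hme := PySem.Set.mem_ofList error_edges e
    simp only [List.mem_filter, decide_eq_true_eq]
    constructor
    · rintro ⟨hI, hE⟩
      exact ⟨hme.mpr (by simpa using hE), hg.mpr hI⟩
    · rintro ⟨hS, hT⟩
      exact ⟨hg.mp hT, by simpa using hme.mp hS⟩
  rw [h4]

-- ===== VERDICT (by name: the statement is the Claim_ definition above) =====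
theorem syndrome_from_errors_spec : Claim_equal_syndrome_from_errors := by
  intro error_edges d _
  show syndrome_from_errors error_edges d
      = PySem.List.sorted2
          ((((PySem.Set.ofList error_edges).foldl (pvStep d) PySem.Dict.empty).items.filter (fun vp =>
            vp.2 == 1 && decide (0 ≤ vp.1.1 ∧ vp.1.1 ≤ d - 1 ∧ 1 ≤ vp.1.2 ∧ vp.1.2 ≤ d - 2))).map (·.1))
          (fun v => v.2) (fun v => v.1)
  set par := (PySem.Set.ofList error_edges).foldl (pvStep d) PySem.Dict.empty with hpar
  set dfs := ((par.items.filter (fun vp =>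
    vp.2 == 1 && decide (0 ≤ vp.1.1 ∧ vp.1.1 ≤ d - 1 ∧ 1 ≤ vp.1.2 ∧ vp.1.2 ≤ d - 2))).map (·.1)) with hdfs
  have hnodK : par.keys.Nodup :=
    pv_keys_nodup_fold d (PySem.Set.ofList error_edges) _ (PySem.Dict.nodup_keys_empty)
  have hmemdfs : ∀ v, v ∈ dfs ↔ (par.getD v 0 = 1 ∧ pvMeasured d v) := by
    intro v
    constructor
    · intro hv
      rw [hdfs] at hv
      simp only [List.mem_map, List.mem_filter] at hv
      obtain ⟨⟨w, p'⟩, ⟨hmem, hq⟩, rfl⟩ := hv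
      simp only [Bool.and_eq_true, beq_iff_eq, decide_eq_true_eq] at hq
      have hg := PySem.Dict.getD_of_mem_items par hmem hnodK 0
      exact ⟨by rw [hg, hq.1], hq.2⟩
    · rintro ⟨hgd, hb⟩
      have hg? : par.get? v = some 1 := by
        rcases hcase : par.get? v with _ | p'
        · have h0 : par.getD v 0 = 0 := by simp [PySem.Dict.getD, hcase]
          omega
        · have h0 : par.getD v 0 = p' := by simp [PySem.Dict.getD, hcase]
          exact congrArg some (by omega)
      have hmem := PySem.Dict.mem_items_of_get?_eq_some par hg?
      refine List.mem_map.mpr ⟨(v, 1), List.mem_filter.mpr ⟨hmem, ?_⟩, rfl⟩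
      obtain ⟨b1, b2, b3, b4⟩ := hb
      simp [b1, b2, b3, b4]
  have hnodupdfs : dfs.Nodup := by
    have hk : (par.items.map (fun x => x.1)).Nodup := hnodK
    rw [hdfs]
    exact hk.sublist (List.Sublist.map (f := fun x : (Int × Int) × Int => x.1)
      (List.filter_sublist (l := par.items)))
  have hAout : (measured_vertices d).filter (fun v => decide (pvAparity error_edges d v = 1))
      |>.Pairwise pvLexLt := List.Pairwise.sublist List.filter_sublist (pv_pairwise_measured d)
  have hperm : ((measured_vertices d).filter
      (fun v => decide (pvAparity error_edges d v = 1))).Perm dfs := by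
    rw [List.perm_ext_iff_of_nodup ((pv_nodup_measured d).filter _) hnodupdfs]
    intro v
    rw [hmemdfs v, List.mem_filter]
    simp only [decide_eq_true_eq, pv_mem_measured]
    constructor
    · rintro ⟨hm, hp⟩
      exact ⟨by rw [← pv_parity_eq error_edges d v hm]; exact hp, hm⟩
    · rintro ⟨hp, hm⟩
      exact ⟨hm, by rw [pv_parity_eq error_edges d v hm]; exact hp⟩
  rw [pv_A_eq_filter error_edges d]
  exact (pv_sorted2_eq dfs _ hperm hAout).symm
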